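-- pv_equiv track=rewrite | github.com/kyungjun-kim/Problem_Solving | Programmers/Level_1/부족한 금액 계산하기.py | solution
-- ===== SOURCE A (Python) =====
-- def solution(price, money, count):
--     answer = - money
--     for i in range(price, price*count+1, price):
--         answer += i
--     if answer <= 0 :
--         return 0
--     else :
--         return answer
-- ===== SOURCE B (Python) =====
-- def solution(price, money, count):
--     # closed form of the arithmetic series price*1 + price*2 + ... + price*count
--     shortfall = price * count * (count + 1) // 2 - money
--     return shortfall if shortfall > 0 else 0
-- ===== Notes on version B (the rewrite author's own statement) =====
-- stated objective: faster
-- what changed: Replaces the O(count) loop summing the arithmetic series with the closed form price*count*(count+1)//2 - money, clamped at 0.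
-- outside the precondition, e.g. on solution(-2, -10, 3): A returns 4, B returns 0; on solution(0, 1, 3): A raises ValueError, B returns 0
import Mathlib
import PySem

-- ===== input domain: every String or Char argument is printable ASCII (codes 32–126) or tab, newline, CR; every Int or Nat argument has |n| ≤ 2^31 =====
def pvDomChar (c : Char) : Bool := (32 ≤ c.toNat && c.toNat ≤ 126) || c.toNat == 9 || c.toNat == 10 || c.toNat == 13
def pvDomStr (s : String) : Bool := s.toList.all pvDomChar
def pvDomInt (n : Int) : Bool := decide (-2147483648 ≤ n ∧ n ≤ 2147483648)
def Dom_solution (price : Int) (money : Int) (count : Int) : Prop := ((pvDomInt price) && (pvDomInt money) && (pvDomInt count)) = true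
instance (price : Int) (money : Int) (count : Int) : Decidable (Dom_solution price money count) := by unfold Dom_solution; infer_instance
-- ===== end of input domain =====

-- B replaces A's O(count) summation loop with the closed arithmetic-series formula (O(1)).
-- Pre_solution restricts to the problem's natural domain price ≥ 1, count ≥ 0: price = 0 makes
-- A raise ValueError (range step 0), and negative price/count lie outside the task's domain.


-- ===== PORT A =====
def solution (price : Int) (money : Int) (count : Int) : Int :=
  let answer := (PySem.List.pyRange price (price * count + 1) price).foldl (fun a i => a + i) (-money)
  if answer ≤ 0 then 0 else answer

-- ===== PORT B =====
def solution_alt (price : Int) (money : Int) (count : Int) : Int :=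
  let shortfall := PySem.Int.floordiv (price * count * (count + 1)) 2 - money
  if shortfall > 0 then shortfall else 0

-- ===== PRECONDITION & SPEC =====
-- Pre_ excludes price = 0 (A raises ValueError there) and, stated narrowing: also price < 0 and
-- count < 0, inputs outside the task's natural domain (price ≥ 1, count ≥ 0) on which A still returns.
def Pre_solution (price : Int) (money : Int) (count : Int) : Prop := 1 ≤ price ∧ 0 ≤ count
instance (price : Int) (money : Int) (count : Int) : Decidable (Pre_solution price money count) := by unfold Pre_solution; infer_instance
def pvWitness_solution : Int × Int × Int := (3, 20, 4)
def Spec_solution (price : Int) (money : Int) (count : Int) (out : Int) : Prop := out = solution_alt price money count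
instance (price : Int) (money : Int) (count : Int) (out : Int) : Decidable (Spec_solution price money count out) := by unfold Spec_solution; infer_instance

-- ===== CLAIM (what is proved, stated in full; the proofs are below) =====
def Claim_equal_solution : Prop := ∀ (price : Int) (money : Int) (count : Int), Dom_solution price money count → Pre_solution price money count → Spec_solution price money count (solution price money count)

-- ===== LEMMAS AND PROOFS =====

-- twice the series sum, by induction on the number of terms
lemma pv_two_mul_sum (p : Int) (n : Nat) :
    2 * ((List.range n).map (fun k : Nat => p + p * (k : Int))).sum = p * n * (n + 1) := by
  induction n with
  | zero => simp
  | succ m ih =>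
    rw [List.range_succ, List.map_append, List.sum_append]
    push_cast
    push_cast at ih
    simp only [List.map_cons, List.map_nil, List.sum_cons, List.sum_nil]
    ring_nf
    ring_nf at ih
    omega

lemma pv_foldl_add_sum (l : List Int) (init : Int) :
    l.foldl (fun a i => a + i) init = init + l.sum := by
  induction l generalizing init with
  | nil => simp
  | cons x xs ih => simp [List.foldl_cons, ih, List.sum_cons]; ring

-- the loop's range is exactly count terms
lemma pv_range_eq (p c : Int) (hp : 1 ≤ p) (hc : 0 ≤ c) :
    PySem.List.pyRange p (p * c + 1) p = (List.range c.toNat).map (fun k : Nat => p + p * (k : Int)) := by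
  rw [PySem.List.pyRange_of_pos _ _ (by omega)]
  congr 1
  by_cases h : p < p * c + 1
  · simp only [if_pos h]
    have h1 : p * c + 1 - p + p - 1 = p * c := by ring
    rw [h1]
    have hc1 : 1 ≤ c := by
      by_contra hcn
      have : c = 0 := by omega
      subst this; simp at h; omega
    congr 1
    rw [mul_comm, Int.mul_ediv_cancel _ (by omega)]
  · simp only [if_neg h]
    have : c = 0 := by nlinarith
    simp [this]

-- ===== VERDICT (by name: the statement is the Claim_ definition above) =====
theorem solution_spec : Claim_equal_solution := by
  intro price money count _ hpre
  obtain ⟨hp, hc⟩ := hpre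
  unfold Spec_solution solution solution_alt
  rw [pv_range_eq price count hp hc, pv_foldl_add_sum]
  have h2 := pv_two_mul_sum price count.toNat
  have hcc : (count.toNat : Int) = count := Int.toNat_of_nonneg hc
  rw [hcc] at h2
  rw [PySem.Int.floordiv_eq_ediv_of_pos (by omega)]
  have hdiv : price * count * (count + 1) / 2 = ((List.range count.toNat).map (fun k : Nat => price + price * (k : Int))).sum := by omega
  rw [hdiv]
  dsimp only
  split_ifs <;> omega
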